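-- pv_equiv track=rewrite | github.com/ASSERT-KTH/Mokav | experiments/pynguin/c4b/single-return/generated_tests/src_2015/5/src_2015.py | func
-- ===== SOURCE A (Python) =====
-- def func(*args):
--
-- 	a = int(args[0])
-- 	b = int(args[1])
-- 	c = int(args[2])
-- 	i = (a * 2)
-- 	z = (a * 4)
-- 	while ((i > b) or (z > c)):
-- 	    a -= 1
-- 	    i = (a * 2)
-- 	    z = (a * 4)
-- 	return((a * 7))
-- ===== SOURCE B (Python) =====
-- def func(*args):
--     a = int(args[0])
--     b = int(args[1])
--     c = int(args[2])
--     return 7 * min(a, b // 2, c // 4)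
-- ===== Notes on version B (the rewrite author's own statement) =====
-- stated objective: faster
-- what changed: Replaces the decrement-until-bounds loop by the closed form 7*min(a, b//2, c//4).
import Mathlib
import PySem

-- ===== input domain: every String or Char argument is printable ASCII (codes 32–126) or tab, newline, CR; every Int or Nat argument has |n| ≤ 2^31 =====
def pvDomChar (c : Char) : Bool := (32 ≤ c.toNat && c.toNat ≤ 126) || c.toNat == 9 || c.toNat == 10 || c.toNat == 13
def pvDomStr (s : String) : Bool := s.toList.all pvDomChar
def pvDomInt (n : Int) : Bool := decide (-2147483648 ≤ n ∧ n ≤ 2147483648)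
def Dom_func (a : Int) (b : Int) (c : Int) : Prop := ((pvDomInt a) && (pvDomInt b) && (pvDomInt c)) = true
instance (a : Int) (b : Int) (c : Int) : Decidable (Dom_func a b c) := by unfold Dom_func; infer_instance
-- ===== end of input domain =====

-- B replaces A's decrement loop by the closed form 7 * min(a, b//2, c//4); return values proved equal.
-- ===== PORT A =====
-- the while loop of A: decrement a while (a*2 > b) or (a*4 > c)
def funcLoop (a b c : Int) : Int :=
  if (a * 2 > b) ∨ (a * 4 > c) then funcLoop (a - 1) b c else a
  termination_by (a - min (PySem.Int.floordiv b 2) (PySem.Int.floordiv c 4)).toNat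
  decreasing_by
    rename_i h
    have hb : ¬ (a ≤ PySem.Int.floordiv b 2) ∨ ¬ (a ≤ PySem.Int.floordiv c 4) := by
      rcases h with h | h
      · left; rw [PySem.Int.le_floordiv_iff_mul_le (by omega)]; omega
      · right; rw [PySem.Int.le_floordiv_iff_mul_le (by omega)]; omega
    omega

def func (a : Int) (b : Int) (c : Int) : Int := funcLoop a b c * 7

-- ===== PORT B =====
def func_alt (a : Int) (b : Int) (c : Int) : Int :=
  7 * min a (min (PySem.Int.floordiv b 2) (PySem.Int.floordiv c 4))

-- ===== PRECONDITION & SPEC =====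
def Spec_func (a : Int) (b : Int) (c : Int) (out : Int) : Prop := out = func_alt a b c
instance (a : Int) (b : Int) (c : Int) (out : Int) : Decidable (Spec_func a b c out) := by unfold Spec_func; infer_instance

-- ===== CLAIM (what is proved, stated in full; the proofs are below) =====
def Claim_equal_func : Prop := ∀ (a : Int) (b : Int) (c : Int), Dom_func a b c → Spec_func a b c (func a b c)

-- ===== LEMMAS AND PROOFS =====

-- ===== VERDICT (by name: the statement is the Claim_ definition above) =====
-- the loop computes the minimum of a and the two floor-division bounds
theorem funcLoop_eq (a b c : Int) :
    funcLoop a b c = min a (min (PySem.Int.floordiv b 2) (PySem.Int.floordiv c 4)) := by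
  fun_induction funcLoop a b c with
  | case1 a h ih =>
    have hb : ¬ (a ≤ PySem.Int.floordiv b 2) ∨ ¬ (a ≤ PySem.Int.floordiv c 4) := by
      rcases h with h | h
      · left; rw [PySem.Int.le_floordiv_iff_mul_le (by omega)]; omega
      · right; rw [PySem.Int.le_floordiv_iff_mul_le (by omega)]; omega
    rw [ih]; omega
  | case2 a h =>
    rw [not_or, not_lt, not_lt] at h
    obtain ⟨hb', hc'⟩ := h
    have h1 : a ≤ PySem.Int.floordiv b 2 := by
      rw [PySem.Int.le_floordiv_iff_mul_le (by omega)]; omega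
    have h2 : a ≤ PySem.Int.floordiv c 4 := by
      rw [PySem.Int.le_floordiv_iff_mul_le (by omega)]; omega
    omega

theorem func_spec : Claim_equal_func := by
  intro a b c _
  unfold Spec_func func func_alt
  rw [funcLoop_eq]
  ring
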